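-- pv_equiv track=rewrite | github.com/arcorck/DUT-AS | sdd/TP4.py | peutSurvivre
-- ===== SOURCE A (Python) =====
-- def peutSurvivre(regimeAlimentaire,nourritureDisponible) :
--     res = {}
--     for region in nourritureDisponible.keys() :
--         for animal, ensaliment in regimeAlimentaire.items() :
--             for aliment in ensaliment :
--                 if aliment in nourritureDisponible[region] :
--                     if region not in res :
--                         res[region] = set()
--                     res[region].add(animal)
--     return res
-- ===== SOURCE B (Python) =====
-- def peutSurvivre(regimeAlimentaire, nourritureDisponible):
--     # Stage 1: inverted index: food -> set of animals whose regime contains it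
--     foodToAnimals = {}
--     for animal, ensaliment in regimeAlimentaire.items():
--         for aliment in ensaliment:
--             if aliment not in foodToAnimals:
--                 foodToAnimals[aliment] = set()
--             foodToAnimals[aliment].add(animal)
--     # Stage 2: the survival relation, as a set of (region, animal) pairs
--     pairs = set()
--     for region, dispo in nourritureDisponible.items():
--         for aliment in dispo:
--             for animal in foodToAnimals.get(aliment, ()):
--                 pairs.add((region, animal))
--     # Stage 3: assemble the result, regions in input order, dropping empty ones
--     res = {}
--     for region in nourritureDisponible:
--         survivants = {animal for animal in regimeAlimentaire if (region, animal) in pairs}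
--         if survivants:
--             res[region] = survivants
--     return res
-- ===== Notes on version B (the rewrite author's own statement) =====
-- stated objective: alternative
-- what changed: Replaces A's triple nested scan (per region, per animal, per aliment, list membership) by an inverted index food->animals built once, a survival relation computed as a set of (region, animal) pairs disseminated food-by-food, and a final assembly pass in input order.
import Mathlib
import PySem

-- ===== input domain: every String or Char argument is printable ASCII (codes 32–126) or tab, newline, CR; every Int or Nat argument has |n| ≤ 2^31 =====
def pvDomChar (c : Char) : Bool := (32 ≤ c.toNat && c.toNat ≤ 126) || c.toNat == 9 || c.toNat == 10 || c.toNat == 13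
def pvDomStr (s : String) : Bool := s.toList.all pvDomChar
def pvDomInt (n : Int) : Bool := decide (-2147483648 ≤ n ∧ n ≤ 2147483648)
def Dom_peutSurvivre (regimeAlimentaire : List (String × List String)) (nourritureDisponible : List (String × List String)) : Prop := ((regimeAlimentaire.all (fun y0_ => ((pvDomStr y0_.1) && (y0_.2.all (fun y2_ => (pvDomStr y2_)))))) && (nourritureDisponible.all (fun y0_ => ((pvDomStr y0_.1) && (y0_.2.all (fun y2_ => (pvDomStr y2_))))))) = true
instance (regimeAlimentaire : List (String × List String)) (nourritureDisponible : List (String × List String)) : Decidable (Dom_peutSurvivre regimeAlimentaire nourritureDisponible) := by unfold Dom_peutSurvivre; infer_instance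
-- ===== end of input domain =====

-- B replaces A's triple nested membership scan by three stages: an inverted index food -> animals,
-- a survival relation built as a set of (region, animal) pairs, and an assembly pass in input order.


-- ===== PORT A =====
def peutSurvivre (regimeAlimentaire : List (String × List String)) (nourritureDisponible : List (String × List String)) : List (String × List String) :=
  let rd : PySem.Dict String (List String) := PySem.Dict.ofList regimeAlimentaire
  let nd : PySem.Dict String (List String) := PySem.Dict.ofList nourritureDisponible
  let res : PySem.Dict String (PySem.Set String) :=
    nd.keys.foldl (fun res region =>
      rd.items.foldl (fun res ai =>
        ai.2.foldl (fun res aliment =>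
          if aliment ∈ nd.getD region [] then
            let res := if res.contains region then res else res.insert region PySem.Set.empty
            res.modify region PySem.Set.empty (fun s => PySem.Set.add s ai.1)
          else res) res) res) PySem.Dict.empty
  res.items

-- ===== PORT B =====
-- Stage 1 of Source B: inverted index food -> set of animals whose regime contains it
def pvFoodToAnimals (regimeAlimentaire : List (String × List String)) : PySem.Dict String (PySem.Set String) :=
  (PySem.Dict.ofList regimeAlimentaire).items.foldl (fun fta ai =>
    ai.2.foldl (fun fta aliment =>
      (if fta.contains aliment then fta else fta.insert aliment PySem.Set.empty).modify aliment
        PySem.Set.empty (fun s => PySem.Set.add s ai.1)) fta) PySem.Dict.empty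

-- Stage 2 of Source B: the survival relation as a set of (region, animal) pairs
def pvPairs (regimeAlimentaire : List (String × List String)) (nourritureDisponible : List (String × List String)) : PySem.Set (String × String) :=
  (PySem.Dict.ofList nourritureDisponible).items.foldl (fun pairs p =>
    p.2.foldl (fun pairs aliment =>
      ((pvFoodToAnimals regimeAlimentaire).getD aliment []).foldl
        (fun pairs animal => PySem.Set.add pairs (p.1, animal)) pairs) pairs) PySem.Set.empty

-- Stage 3 of Source B: assemble the result, regions in input order, dropping empty ones
def peutSurvivre_alt (regimeAlimentaire : List (String × List String)) (nourritureDisponible : List (String × List String)) : List (String × List String) :=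
  let rd : PySem.Dict String (List String) := PySem.Dict.ofList regimeAlimentaire
  let nd : PySem.Dict String (List String) := PySem.Dict.ofList nourritureDisponible
  let pairs : PySem.Set (String × String) := pvPairs regimeAlimentaire nourritureDisponible
  let res : PySem.Dict String (PySem.Set String) :=
    nd.keys.foldl (fun res region =>
      let survivants : PySem.Set String :=
        rd.keys.foldl (fun s animal =>
          if PySem.Set.contains pairs (region, animal) then PySem.Set.add s animal else s)
          PySem.Set.empty
      if survivants ≠ [] then res.insert region survivants else res) PySem.Dict.empty
  res.items

-- ===== PRECONDITION & SPEC =====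
def Spec_peutSurvivre (regimeAlimentaire : List (String × List String)) (nourritureDisponible : List (String × List String)) (out : List (String × List String)) : Prop := out = peutSurvivre_alt regimeAlimentaire nourritureDisponible
instance (regimeAlimentaire : List (String × List String)) (nourritureDisponible : List (String × List String)) (out : List (String × List String)) : Decidable (Spec_peutSurvivre regimeAlimentaire nourritureDisponible out) := by unfold Spec_peutSurvivre; infer_instance

-- ===== CLAIM (what is proved, stated in full; the proofs are below) =====
def Claim_equal_peutSurvivre : Prop := ∀ (regimeAlimentaire : List (String × List String)) (nourritureDisponible : List (String × List String)), Dom_peutSurvivre regimeAlimentaire nourritureDisponible → Spec_peutSurvivre regimeAlimentaire nourritureDisponible (peutSurvivre regimeAlimentaire nourritureDisponible)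

-- ===== LEMMAS AND PROOFS =====
-- Set.add never produces the empty list
theorem pv_add_ne_nil (s : PySem.Set String) (x : String) : PySem.Set.add s x ≠ [] := by
  simp only [PySem.Set.add]
  split <;> rename_i h <;> intro hn
  · subst hn; simp [PySem.Set.contains] at h
  · simp at hn

theorem pv_modify_insert (d : PySem.Dict String (PySem.Set String)) (k : String)
    (v d0 : PySem.Set String) (f : PySem.Set String → PySem.Set String) :
    (d.insert k v).modify k d0 f = d.insert k (f v) := by
  simp [PySem.Dict.modify, PySem.Dict.getD_insert_self, PySem.Dict.insert_insert_self]

-- A's innermost (aliment) loop, started on a state coupled to an accumulated set s,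
-- adds x once iff some aliment satisfies P.
theorem pv_inner (P : String → Prop) [DecidablePred P] (region x : String)
    (res : PySem.Dict String (PySem.Set String)) (h : res.contains region = false) :
    ∀ (ens : List String) (s : PySem.Set String),
    ens.foldl (fun r a =>
        if P a then
          (if r.contains region then r else r.insert region PySem.Set.empty).modify region
            PySem.Set.empty (fun t => PySem.Set.add t x)
        else r)
      (if s = [] then res else res.insert region s)
    = (if (if ens.any (fun a => decide (P a)) then PySem.Set.add s x else s) = [] then res
       else res.insert region (if ens.any (fun a => decide (P a)) then PySem.Set.add s x else s)) := by
  intro ens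
  induction ens with
  | nil => intro s; simp
  | cons a rest ih =>
    intro s
    by_cases hp : P a
    · rw [List.foldl_cons, if_pos hp]
      have hstate :
          ((if (if s = [] then res else res.insert region s).contains region = true then
              (if s = [] then res else res.insert region s)
            else (if s = [] then res else res.insert region s).insert region
                PySem.Set.empty).modify region PySem.Set.empty fun t => PySem.Set.add t x)
          = (if PySem.Set.add s x = [] then res else res.insert region (PySem.Set.add s x)) := by
        by_cases hs : s = []
        · simp [hs, h, pv_modify_insert, PySem.Set.empty]
        · simp [hs, PySem.Dict.contains_insert_self, pv_modify_insert, pv_add_ne_nil]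
      rw [hstate, ih (PySem.Set.add s x)]
      simp [hp, pv_add_ne_nil]
    · simp only [List.foldl_cons, if_neg hp, List.any_cons]
      rw [ih s]
      simp [hp]

-- A's animal loop over a region equals the survivor-set fold followed by one insert.
theorem pv_region (F : List String) (region : String)
    (res : PySem.Dict String (PySem.Set String)) (h : res.contains region = false) :
    ∀ (animals : List (String × List String)) (s : PySem.Set String),
    animals.foldl (fun r ai =>
        ai.2.foldl (fun r a =>
          if a ∈ F then
            (if r.contains region then r else r.insert region PySem.Set.empty).modify region
              PySem.Set.empty (fun t => PySem.Set.add t ai.1)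
          else r) r)
      (if s = [] then res else res.insert region s)
    = (if (animals.foldl (fun s ai => if ai.2.any (fun a => decide (a ∈ F)) then PySem.Set.add s ai.1 else s) s) = [] then res
       else res.insert region (animals.foldl (fun s ai => if ai.2.any (fun a => decide (a ∈ F)) then PySem.Set.add s ai.1 else s) s)) := by
  intro animals
  induction animals with
  | nil => intro s; simp
  | cons ai rest ih =>
    intro s
    simp only [List.foldl_cons]
    rw [pv_inner (fun a => a ∈ F) region ai.1 res h ai.2 s]
    by_cases hb : (ai.2.any fun a => decide (a ∈ F)) = true
    · rw [if_pos hb, ih (PySem.Set.add s ai.1)]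
    · rw [if_neg hb, ih s]

-- Region-by-region: A's lazy dict updates equal build-then-insert steps.
theorem pv_outer (rd nd : PySem.Dict String (List String)) :
    ∀ (items : List (String × List String)) (res : PySem.Dict String (PySem.Set String)),
    (∀ p ∈ items, res.contains p.1 = false) → ((items.map Prod.fst).Nodup) →
    (∀ p ∈ items, nd.getD p.1 [] = p.2) →
    items.foldl (fun res p =>
        rd.items.foldl (fun res ai =>
          ai.2.foldl (fun res aliment =>
            if aliment ∈ nd.getD p.1 [] then
              (if res.contains p.1 then res else res.insert p.1 PySem.Set.empty).modify p.1
                PySem.Set.empty (fun s => PySem.Set.add s ai.1)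
            else res) res) res) res
    = items.foldl (fun res p =>
        if (rd.items.foldl (fun s ai =>
              if ai.2.any (fun a => PySem.Set.contains (PySem.Set.ofList p.2) a) then
                PySem.Set.add s ai.1 else s) PySem.Set.empty) ≠ [] then
          res.insert p.1 (rd.items.foldl (fun s ai =>
              if ai.2.any (fun a => PySem.Set.contains (PySem.Set.ofList p.2) a) then
                PySem.Set.add s ai.1 else s) PySem.Set.empty)
        else res) res := by
  intro items
  induction items with
  | nil => intro res _ _ _; rfl
  | cons p rest ih =>
    intro res hres hnd hget
    have hc : res.contains p.1 = false := hres p (by simp)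
    have hF : nd.getD p.1 [] = p.2 := hget p (by simp)
    have hcond : ∀ a : String,
        PySem.Set.contains (PySem.Set.ofList p.2) a = decide (a ∈ nd.getD p.1 []) := by
      intro a; rw [hF]; simp [PySem.Set.contains, PySem.Set.mem_ofList]
    have hq1 : ∀ q ∈ rest, q.1 ≠ p.1 := by
      intro q hq
      have h1 : p.1 ∉ rest.map Prod.fst := (List.nodup_cons.mp (by simpa using hnd)).1
      intro he; exact h1 (he ▸ List.mem_map_of_mem hq)
    have hnd' : (rest.map Prod.fst).Nodup := (List.nodup_cons.mp (by simpa using hnd)).2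
    simp only [List.foldl_cons, hcond]
    have ha := pv_region (nd.getD p.1 []) p.1 res hc rd.items PySem.Set.empty
    rw [show (if (PySem.Set.empty : PySem.Set String) = [] then res
          else res.insert p.1 PySem.Set.empty) = res from if_pos rfl] at ha
    rw [ha]
    by_cases h0 : (rd.items.foldl (fun s ai =>
        if ai.2.any (fun a => decide (a ∈ nd.getD p.1 [])) then PySem.Set.add s ai.1 else s)
        PySem.Set.empty) = []
    · rw [if_pos h0, if_neg (by simpa using h0)]
      exact ih res (fun q hq => hres q (by simp [hq])) hnd' (fun q hq => hget q (by simp [hq]))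
    · rw [if_neg h0, if_pos h0]
      refine ih _ (fun q hq => ?_) hnd' (fun q hq => hget q (by simp [hq]))
      have := hres q (by simp [hq])
      simp [PySem.Dict.contains_insert, hq1 q hq, this]

-- Stage 1 per-aliment step written as one insert
theorem pv_step (d : PySem.Dict String (PySem.Set String)) (a v : String) :
    (if d.contains a then d else d.insert a PySem.Set.empty).modify a
      PySem.Set.empty (fun s => PySem.Set.add s v)
    = d.insert a (PySem.Set.add (d.getD a []) v) := by
  by_cases h : d.contains a = true
  · rw [if_pos h]
    simp [PySem.Dict.modify, PySem.Set.empty, PySem.Dict.getD_eq_get?_getD]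
  · rw [if_neg (by simpa using h), pv_modify_insert]
    have hd : d.getD a ([] : PySem.Set String) = [] :=
      PySem.Dict.getD_of_not_contains d [] (by simpa using h)
    rw [hd]
    rfl

-- Membership in the inverted index after one animal's aliment loop
theorem pv_fta_inner (v : String) :
    ∀ (ens : List String) (d : PySem.Dict String (PySem.Set String)) (f x : String),
    x ∈ (ens.foldl (fun d a => d.insert a (PySem.Set.add (d.getD a []) v)) d).getD f []
    ↔ x ∈ d.getD f [] ∨ (x = v ∧ f ∈ ens) := by
  intro ens
  induction ens with
  | nil => intro d f x; simp
  | cons a rest ih =>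
    intro d f x
    rw [List.foldl_cons, ih, PySem.Dict.getD_insert]
    by_cases hf : f = a
    · rw [if_pos hf, PySem.Set.mem_add]
      subst hf
      constructor
      · rintro (⟨h | h⟩ | ⟨hv, _⟩)
        · exact Or.inl h
        · exact Or.inr ⟨h, by simp⟩
        · exact Or.inr ⟨hv, by simp⟩
      · rintro (h | ⟨hv, _⟩)
        · exact Or.inl (Or.inl h)
        · exact Or.inl (Or.inr hv)
    · rw [if_neg hf]
      constructor
      · rintro (h | ⟨hv, hm⟩)
        · exact Or.inl h
        · exact Or.inr ⟨hv, by simp [hm]⟩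
      · rintro (h | ⟨hv, hm⟩)
        · exact Or.inl h
        · rcases List.mem_cons.mp hm with h' | h'
          · exact absurd h' hf
          · exact Or.inr ⟨hv, h'⟩

-- Membership in the full inverted index
theorem pv_fta_mem_aux :
    ∀ (items : List (String × List String)) (d : PySem.Dict String (PySem.Set String)) (f x : String),
    x ∈ (items.foldl (fun d ai =>
          ai.2.foldl (fun d a => d.insert a (PySem.Set.add (d.getD a []) ai.1)) d) d).getD f []
    ↔ x ∈ d.getD f [] ∨ ∃ ai ∈ items, x = ai.1 ∧ f ∈ ai.2 := by
  intro items
  induction items with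
  | nil => intro d f x; simp
  | cons ai rest ih =>
    intro d f x
    rw [List.foldl_cons, ih, pv_fta_inner]
    constructor
    · rintro (⟨h | h⟩ | ⟨q, hq, h⟩)
      · exact Or.inl h
      · exact Or.inr ⟨ai, by simp, h⟩
      · exact Or.inr ⟨q, by simp [hq], h⟩
    · rintro (h | ⟨q, hq, h⟩)
      · exact Or.inl (Or.inl h)
      · rcases List.mem_cons.mp hq with h' | h'
        · exact Or.inl (Or.inr (h' ▸ h))
        · exact Or.inr ⟨q, h', h⟩

theorem pv_fta_mem (regime : List (String × List String)) (f x : String) :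
    x ∈ (pvFoodToAnimals regime).getD f []
    ↔ ∃ ai ∈ (PySem.Dict.ofList regime).items, x = ai.1 ∧ f ∈ ai.2 := by
  unfold pvFoodToAnimals
  have hrw : ∀ ai : String × List String,
      (fun (fta : PySem.Dict String (PySem.Set String)) (aliment : String) =>
        (if fta.contains aliment then fta else fta.insert aliment PySem.Set.empty).modify aliment
          PySem.Set.empty (fun s => PySem.Set.add s ai.1))
      = fun fta aliment => fta.insert aliment (PySem.Set.add (fta.getD aliment []) ai.1) := by
    intro ai; funext d a; exact pv_step d a ai.1
  simp only [hrw]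
  rw [pv_fta_mem_aux]
  simp [PySem.Dict.getD_empty]

-- Membership after one region's food loop of stage 2
theorem pv_pairs_region (g : String → List String) (r : String) :
    ∀ (fs : List String) (s : PySem.Set (String × String)) (x : String × String),
    x ∈ fs.foldl (fun s f => (g f).foldl (fun s a => PySem.Set.add s (r, a)) s) s
    ↔ x ∈ s ∨ ∃ f ∈ fs, ∃ a ∈ g f, x = (r, a) := by
  intro fs
  induction fs with
  | nil => intro s x; simp
  | cons f rest ih =>
    intro s x
    rw [List.foldl_cons, ih]
    rw [PySem.Set.mem_foldl_add (f := fun a => (r, a))]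
    constructor
    · rintro (⟨h | ⟨a, ha, hx⟩⟩ | ⟨f', hf', h⟩)
      · exact Or.inl h
      · exact Or.inr ⟨f, by simp, a, ha, hx⟩
      · exact Or.inr ⟨f', by simp [hf'], h⟩
    · rintro (h | ⟨f', hf', a, ha, hx⟩)
      · exact Or.inl (Or.inl h)
      · rcases List.mem_cons.mp hf' with h' | h'
        · exact Or.inl (Or.inr ⟨a, h' ▸ ha, hx⟩)
        · exact Or.inr ⟨f', h', a, ha, hx⟩

-- Membership in the full survival relation
theorem pv_pairs_mem (regime nour : List (String × List String)) (x : String × String) :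
    x ∈ pvPairs regime nour
    ↔ ∃ q ∈ (PySem.Dict.ofList nour).items, ∃ f ∈ q.2,
        ∃ a ∈ (pvFoodToAnimals regime).getD f [], x = (q.1, a) := by
  unfold pvPairs
  generalize (PySem.Dict.ofList nour).items = items
  have : ∀ (its : List (String × List String)) (s : PySem.Set (String × String)),
      x ∈ its.foldl (fun pairs p =>
          p.2.foldl (fun pairs aliment =>
            ((pvFoodToAnimals regime).getD aliment []).foldl
              (fun pairs animal => PySem.Set.add pairs (p.1, animal)) pairs) pairs) s
      ↔ x ∈ s ∨ ∃ q ∈ its, ∃ f ∈ q.2, ∃ a ∈ (pvFoodToAnimals regime).getD f [], x = (q.1, a) := by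
    intro its
    induction its with
    | nil => intro s; simp
    | cons q rest ih =>
      intro s
      rw [List.foldl_cons, ih, pv_pairs_region]
      constructor
      · rintro (⟨h | ⟨f, hf, a, ha, hx⟩⟩ | ⟨q', hq', h⟩)
        · exact Or.inl h
        · exact Or.inr ⟨q, by simp, f, hf, a, ha, hx⟩
        · exact Or.inr ⟨q', by simp [hq'], h⟩
      · rintro (h | ⟨q', hq', f, hf, a, ha, hx⟩)
        · exact Or.inl (Or.inl h)
        · rcases List.mem_cons.mp hq' with h' | h'
          · exact Or.inl (Or.inr ⟨f, h' ▸ hf, a, ha, h' ▸ hx⟩)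
          · exact Or.inr ⟨q', h', f, hf, a, ha, hx⟩
  rw [this]
  simp [PySem.Set.empty]

-- The pair test of stage 3 equals A's any-aliment membership test
theorem pv_cond (regime nour : List (String × List String))
    (p ai : String × List String)
    (hp : p ∈ (PySem.Dict.ofList nour).items) (hai : ai ∈ (PySem.Dict.ofList regime).items) :
    PySem.Set.contains (pvPairs regime nour) (p.1, ai.1)
    = ai.2.any (fun a => PySem.Set.contains (PySem.Set.ofList p.2) a) := by
  have hndn := PySem.Dict.nodup_keys_ofList (κ := String) (ν := List String) nour
  have hndr := PySem.Dict.nodup_keys_ofList (κ := String) (ν := List String) regime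
  rw [Bool.eq_iff_iff, PySem.Set.contains_iff, pv_pairs_mem, List.any_eq_true]
  constructor
  · rintro ⟨q, hq, f, hf, a, ha, hx⟩
    obtain ⟨hq1, ha1⟩ := Prod.mk.inj hx
    have h1 : (PySem.Dict.ofList nour).getD q.1 [] = q.2 :=
      PySem.Dict.getD_of_mem_items _ (by simpa using hq) hndn []
    have h2 : (PySem.Dict.ofList nour).getD p.1 [] = p.2 :=
      PySem.Dict.getD_of_mem_items _ (by simpa using hp) hndn []
    have hq2 : q.2 = p.2 := by rw [← h1, ← h2, hq1]
    rcases (pv_fta_mem regime f a).mp ha with ⟨aj, haj, hxa, hfa⟩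
    have h3 : (PySem.Dict.ofList regime).getD aj.1 [] = aj.2 :=
      PySem.Dict.getD_of_mem_items _ (by simpa using haj) hndr []
    have h4 : (PySem.Dict.ofList regime).getD ai.1 [] = ai.2 :=
      PySem.Dict.getD_of_mem_items _ (by simpa using hai) hndr []
    have haj2 : aj.2 = ai.2 := by rw [← h3, ← h4, ← hxa, ← ha1]
    refine ⟨f, by rwa [haj2] at hfa, ?_⟩
    rw [PySem.Set.contains_iff, PySem.Set.mem_ofList, ← hq2]
    exact hf
  · rintro ⟨f, hf, hmem⟩
    rw [PySem.Set.contains_iff, PySem.Set.mem_ofList] at hmem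
    refine ⟨p, hp, f, hmem, ai.1, ?_, rfl⟩
    exact (pv_fta_mem regime f ai.1).mpr ⟨ai, hai, rfl, hf⟩

-- Stage 3's survivor set for a region equals A's per-region survivor set
theorem pv_survivants (regime nour : List (String × List String))
    (p : String × List String) (hp : p ∈ (PySem.Dict.ofList nour).items) :
    (List.map (fun x => x.1) (PySem.Dict.ofList regime).items).foldl (fun s animal =>
        if PySem.Set.contains (pvPairs regime nour) (p.1, animal) then PySem.Set.add s animal
        else s) PySem.Set.empty
    = (PySem.Dict.ofList regime).items.foldl (fun s ai =>
        if ai.2.any (fun a => PySem.Set.contains (PySem.Set.ofList p.2) a) then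
          PySem.Set.add s ai.1 else s) PySem.Set.empty := by
  rw [List.foldl_map]
  exact PySem.List.foldl_congr_mem _ _ _ _ (fun s ai hai => by rw [pv_cond regime nour p ai hp hai])

-- ===== VERDICT (by name: the statement is the Claim_ definition above) =====
theorem peutSurvivre_spec : Claim_equal_peutSurvivre := by
  unfold Claim_equal_peutSurvivre Spec_peutSurvivre
  intro regime nour _
  simp only [peutSurvivre, peutSurvivre_alt]
  congr 1
  -- A's side into the canonical per-region form
  simp only [PySem.Dict.keys]
  rw [List.foldl_map, List.foldl_map]
  rw [pv_outer (PySem.Dict.ofList regime) (PySem.Dict.ofList nour) (PySem.Dict.ofList nour).items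
    PySem.Dict.empty (fun p _ => by simp [PySem.Dict.contains_empty])
    (by simpa [PySem.Dict.keys] using PySem.Dict.nodup_keys_ofList nour)
    (fun p hp => PySem.Dict.getD_of_mem_items _ (by simpa using hp) (PySem.Dict.nodup_keys_ofList nour) [])]
  -- B's side: region by region, the survivor sets coincide
  exact (PySem.List.foldl_congr_mem _ _ _ _ (fun res p hp => by rw [pv_survivants regime nour p hp])).symm
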